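-- pv_equiv track=rewrite | github.com/RickZ42/Chiloglottis_genome_2026 | inversion_divergence/plot_inv1936_inv1915_multimodal_figure.py | pack_lanes
-- ===== SOURCE A (Python) =====
-- def pack_lanes(starts, ends, pad_bp=5000):
--     lane_ends = []
--     lanes = []
--     for s, e in zip(starts, ends):
--         assigned = None
--         for i, le in enumerate(lane_ends):
--             if s > le + pad_bp:
--                 assigned = i
--                 lane_ends[i] = e
--                 break
--         if assigned is None:
--             assigned = len(lane_ends)
--             lane_ends.append(e)
--         lanes.append(assigned)
--     return lanes
-- ===== SOURCE B (Python) =====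
-- NEG = -(1 << 40)  # below any start - pad for 32-bit-bounded inputs: marks a not-yet-used lane
--
--
-- def _build(n):
--     # segment tree with n leaves, all NEG; leaf = (min,), node = (min, left_size, left, right)
--     if n == 1:
--         return (NEG,)
--     ls = (n + 1) // 2
--     return (NEG, ls, _build(ls), _build(n - ls))
--
--
-- def _query(t, thr):
--     # leftmost leaf index whose value is < thr, else None
--     if t[0] >= thr:
--         return None
--     if len(t) == 1:
--         return 0
--     r = _query(t[2], thr)
--     if r is not None:
--         return r
--     return t[1] + _query(t[3], thr)
--
--
-- def _update(t, i, v):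
--     if len(t) == 1:
--         return (v,)
--     if i < t[1]:
--         l = _update(t[2], i, v)
--         return (min(l[0], t[3][0]), t[1], l, t[3])
--     r = _update(t[3], i - t[1], v)
--     return (min(t[2][0], r[0]), t[1], t[2], r)
--
--
-- def pack_lanes(starts, ends, pad_bp=5000):
--     n = min(len(starts), len(ends))
--     if n == 0:
--         return []
--     t = _build(n)
--     lanes = []
--     for s, e in zip(starts, ends):
--         i = _query(t, s - pad_bp)  # first lane whose end < s - pad, i.e. s > end + pad
--         t = _update(t, i, e)
--         lanes.append(i)
--     return lanes
-- ===== Notes on version B (the rewrite author's own statement) =====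
-- stated objective: faster
-- what changed: Replaces A's linear first-fit scan over lane ends by a min-segment-tree over n lane slots (unused slots hold a sentinel below any start-pad), answering 'leftmost lane with end < start - pad' by a leftmost-qualifying-leaf query plus a point update.
import Mathlib
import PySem

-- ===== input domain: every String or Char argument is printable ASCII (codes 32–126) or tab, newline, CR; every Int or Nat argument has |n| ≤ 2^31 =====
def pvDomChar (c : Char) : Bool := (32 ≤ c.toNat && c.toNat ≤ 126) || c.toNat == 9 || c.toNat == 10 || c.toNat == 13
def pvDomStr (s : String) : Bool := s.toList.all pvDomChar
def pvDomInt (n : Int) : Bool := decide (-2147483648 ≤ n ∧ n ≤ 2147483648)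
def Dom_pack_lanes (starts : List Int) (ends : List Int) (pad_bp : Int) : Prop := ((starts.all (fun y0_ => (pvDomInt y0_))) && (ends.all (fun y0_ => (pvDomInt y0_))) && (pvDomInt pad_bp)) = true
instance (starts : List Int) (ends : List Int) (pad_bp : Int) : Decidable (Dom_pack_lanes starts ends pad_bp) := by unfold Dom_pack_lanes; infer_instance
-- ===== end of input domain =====

-- B replaces A's quadratic first-fit scan over lane ends by a min-segment-tree
-- (leftmost-qualifying-leaf query + point update); measured faster at large sizes.

-- ===== PORT A =====
-- inner `for i, le in enumerate(lane_ends): if s > le + pad: … break`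
def scanA : List Int → Int → Int → Nat → Option Nat
  | [], _, _, _ => none
  | le :: rest, s, pad, i => if s > le + pad then some i else scanA rest s pad (i + 1)

-- one iteration of A's outer loop: state = (lane_ends, lanes)
def stepA (pad : Int) (st : List Int × List Int) (p : Int × Int) : List Int × List Int :=
  match scanA st.1 p.1 pad 0 with
  | some i => (st.1.set i p.2, st.2 ++ [(i : Int)])
  | none => (st.1 ++ [p.2], st.2 ++ [(st.1.length : Int)])

def pack_lanes (starts : List Int) (ends : List Int) (pad_bp : Int) : List Int :=
  ((starts.zip ends).foldl (stepA pad_bp) ([], [])).2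

-- ===== PORT B =====
-- functional min-segment-tree over lane-end slots; unused slots hold the sentinel NEG
def NEG : Int := -(2 ^ 40)

inductive STree : Type
  | leaf : Int → STree
  | node : Int → Nat → STree → STree → STree
deriving Repr, DecidableEq

def STree.minv : STree → Int
  | .leaf v => v
  | .node m _ _ _ => m

-- Source B _build: n leaves, all NEG, left child gets ⌈n/2⌉ leaves
def stBuild (n : Nat) : STree :=
  if _h : n ≤ 1 then .leaf NEG
  else .node NEG ((n + 1) / 2) (stBuild ((n + 1) / 2)) (stBuild (n - (n + 1) / 2))
decreasing_by all_goals omega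

-- Source B _query: leftmost leaf index with value < thr (none = Python None)
def stQuery : STree → Int → Option Nat
  | .leaf v, thr => if v ≥ thr then none else some 0
  | .node m ls l r, thr =>
    if m ≥ thr then none
    else
      match stQuery l thr with
      | some i => some i
      | none => (stQuery r thr).map (ls + ·)

-- Source B _update: rebuild the path to leaf i with value v, refreshing mins
def stUpdate : STree → Nat → Int → STree
  | .leaf _, _, v => .leaf v
  | .node _ ls l r, i, v =>
    if i < ls then
      let l' := stUpdate l i v
      .node (min l'.minv r.minv) ls l' r
    else
      let r' := stUpdate r (i - ls) v
      .node (min l.minv r'.minv) ls l r'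

-- one iteration of Source B's loop: state = (tree, lanes); the `none` branch is
-- unreachable for Dom inputs (the NEG sentinel always qualifies); Source B raises there
def stepB (pad : Int) (st : STree × List Int) (p : Int × Int) : STree × List Int :=
  match stQuery st.1 (p.1 - pad) with
  | some i => (stUpdate st.1 i p.2, st.2 ++ [(i : Int)])
  | none => (st.1, st.2 ++ [(0 : Int)])

def pack_lanes_alt (starts : List Int) (ends : List Int) (pad_bp : Int) : List Int :=
  let n := min starts.length ends.length
  if n = 0 then []
  else ((starts.zip ends).foldl (stepB pad_bp) (stBuild n, [])).2

-- ===== PRECONDITION & SPEC =====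
def Spec_pack_lanes (starts : List Int) (ends : List Int) (pad_bp : Int) (out : List Int) : Prop := out = pack_lanes_alt starts ends pad_bp
instance (starts : List Int) (ends : List Int) (pad_bp : Int) (out : List Int) : Decidable (Spec_pack_lanes starts ends pad_bp out) := by unfold Spec_pack_lanes; infer_instance

-- ===== CLAIM (what is proved, stated in full; the proofs are below) =====
def Claim_equal_pack_lanes : Prop := ∀ (starts : List Int) (ends : List Int) (pad_bp : Int), Dom_pack_lanes starts ends pad_bp → Spec_pack_lanes starts ends pad_bp (pack_lanes starts ends pad_bp)

-- ===== LEMMAS AND PROOFS =====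

def STree.toL : STree → List Int
  | .leaf v => [v]
  | .node _ _ l r => l.toL ++ r.toL

inductive WF : STree → Prop
  | leaf (v : Int) : WF (.leaf v)
  | node (m : Int) (ls : Nat) (l r : STree) :
      m = min l.minv r.minv → ls = l.toL.length → WF l → WF r → WF (.node m ls l r)

theorem minv_le_mem : ∀ (t : STree), WF t → ∀ x ∈ t.toL, t.minv ≤ x := by
  intro t
  induction t with
  | leaf v => intro _ x hx; simp [STree.toL] at hx; simp [STree.minv, hx]
  | node m ls l r ihl ihr =>
    intro hwf x hx
    obtain - | ⟨_, _, _, _, hm, _, hwl, hwr⟩ := hwf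
    simp only [STree.toL, List.mem_append] at hx
    simp only [STree.minv, hm]
    rcases hx with h | h
    · exact le_trans (min_le_left _ _) (ihl hwl x h)
    · exact le_trans (min_le_right _ _) (ihr hwr x h)

theorem stQuery_eq_findIdx? (thr : Int) :
    ∀ (t : STree), WF t → stQuery t thr = t.toL.findIdx? (fun x => decide (x < thr)) := by
  intro t
  induction t with
  | leaf v =>
    intro _
    by_cases h : v ≥ thr
    · simp [stQuery, STree.toL, List.findIdx?_cons, h, show ¬ v < thr by omega]
    · simp [stQuery, STree.toL, List.findIdx?_cons, h, show v < thr by omega]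
  | node m ls l r ihl ihr =>
    intro hwf
    have hwf' := hwf
    obtain - | ⟨_, _, _, _, hm, hls, hwl, hwr⟩ := hwf
    by_cases h : m ≥ thr
    · have hall : ∀ x ∈ (STree.toL (.node m ls l r)), ¬ x < thr := by
        intro x hx
        have := minv_le_mem _ hwf' x hx
        simp [STree.minv] at this; omega
      simp only [stQuery, if_pos h]
      symm
      rw [List.findIdx?_eq_none_iff]
      intro x hx; simpa using hall x hx
    · simp only [stQuery, if_neg h, STree.toL, List.findIdx?_append, ihl hwl, ihr hwr]
      cases hfl : l.toL.findIdx? (fun x => decide (x < thr)) with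
      | some i => simp [Option.or]
      | none =>
        simp [Option.or, hls]
        cases r.toL.findIdx? (fun x => decide (x < thr)) with
        | some j => simp [Nat.add_comm]
        | none => simp

theorem stUpdate_spec (v : Int) :
    ∀ (t : STree) (i : Nat), WF t → i < t.toL.length →
      WF (stUpdate t i v) ∧ (stUpdate t i v).toL = t.toL.set i v := by
  intro t
  induction t with
  | leaf w =>
    intro i _ hi
    simp [STree.toL] at hi
    subst hi
    exact ⟨WF.leaf v, by simp [stUpdate, STree.toL]⟩
  | node m ls l r ihl ihr =>
    intro i hwf hi
    obtain - | ⟨_, _, _, _, hm, hls, hwl, hwr⟩ := hwf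
    simp [STree.toL] at hi
    by_cases h : i < ls
    · have hil : i < l.toL.length := by omega
      obtain ⟨hw', ht'⟩ := ihl i hwl hil
      simp only [stUpdate, if_pos h, STree.toL]
      refine ⟨WF.node _ _ _ _ rfl ?_ hw' hwr, ?_⟩
      · rw [ht', List.length_set]; exact hls
      · rw [ht', List.set_append, if_pos (by omega)]
    · have hir : i - ls < r.toL.length := by omega
      obtain ⟨hw', ht'⟩ := ihr (i - ls) hwr hir
      simp only [stUpdate, if_neg h, STree.toL]
      refine ⟨WF.node _ _ _ _ rfl hls hwl hw', ?_⟩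
      rw [ht', List.set_append, if_neg (by omega), hls]

theorem stBuild_spec : ∀ (n : Nat), 1 ≤ n →
    WF (stBuild n) ∧ (stBuild n).toL = List.replicate n NEG ∧ (stBuild n).minv = NEG := by
  intro n
  induction n using Nat.strong_induction_on with
  | _ n ih =>
    intro hn
    by_cases h : n ≤ 1
    · have : n = 1 := by omega
      subst this
      rw [stBuild]
      exact ⟨WF.leaf _, by simp [STree.toL, List.replicate], rfl⟩
    · have h1 : 1 ≤ (n + 1) / 2 := by omega
      have h2 : 1 ≤ n - (n + 1) / 2 := by omega
      have hl1 : (n + 1) / 2 < n := by omega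
      have hl2 : n - (n + 1) / 2 < n := by omega
      obtain ⟨wl, tl, ml⟩ := ih _ hl1 h1
      obtain ⟨wr, tr, mr⟩ := ih _ hl2 h2
      rw [stBuild, dif_neg h]
      refine ⟨WF.node _ _ _ _ (by simp [ml, mr]) (by simp [tl]) wl wr, ?_, rfl⟩
      simp only [STree.toL, tl, tr]
      rw [← List.replicate_add]
      congr 1
      omega

theorem scanA_eq_findIdx? (s pad : Int) :
    ∀ (L : List Int) (k : Nat),
      scanA L s pad k = (L.findIdx? (fun x => decide (x < s - pad))).map (k + ·) := by
  intro L
  induction L with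
  | nil => intro k; simp [scanA]
  | cons le rest ih =>
    intro k
    rw [List.findIdx?_cons]
    by_cases h : s > le + pad
    · rw [scanA, if_pos h, if_pos (by simp; omega)]
      simp
    · rw [scanA, if_neg h, if_neg (by simp; omega), ih (k + 1)]
      cases rest.findIdx? (fun x => decide (x < s - pad)) with
      | none => simp
      | some j => simp; omega

theorem main_fold (pad : Int) :
    ∀ (pairs : List (Int × Int)) (L : List Int) (t : STree) (acc : List Int) (n : Nat),
      WF t → t.toL = L ++ List.replicate (n - L.length) NEG →
      L.length + pairs.length ≤ n →
      (∀ p ∈ pairs, NEG < p.1 - pad) →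
      (pairs.foldl (stepA pad) (L, acc)).2 = (pairs.foldl (stepB pad) (t, acc)).2 := by
  intro pairs
  induction pairs with
  | nil => intro L t acc n _ _ _ _; simp
  | cons p ps ih =>
    intro L t acc n hwf htl hlen hbd
    have hlenL : t.toL.length = n := by
      rw [htl]; simp; omega
    have hquery : stQuery t (p.1 - pad) =
        t.toL.findIdx? (fun x => decide (x < p.1 - pad)) := stQuery_eq_findIdx? _ _ hwf
    have hscan : scanA L p.1 pad 0 =
        (L.findIdx? (fun x => decide (x < p.1 - pad))).map (0 + ·) := scanA_eq_findIdx? _ _ _ _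
    have hbd1 : NEG < p.1 - pad := hbd p (by simp)
    have hbd' : ∀ q ∈ ps, NEG < q.1 - pad := fun q hq => hbd q (by simp [hq])
    simp only [List.foldl_cons]
    cases hfl : L.findIdx? (fun x => decide (x < p.1 - pad)) with
    | some i =>
      have hiL : i < L.length := (List.findIdx?_eq_some_iff_findIdx_eq.mp hfl).1
      have hit : i < t.toL.length := by omega
      have hqt : stQuery t (p.1 - pad) = some i := by
        rw [hquery, htl, List.findIdx?_append, hfl]; rfl
      obtain ⟨hw', ht'⟩ := stUpdate_spec p.2 t i hwf hit
      have hA : stepA pad (L, acc) p = (L.set i p.2, acc ++ [(i : Int)]) := by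
        simp [stepA, hscan, hfl]
      have hB : stepB pad (t, acc) p = (stUpdate t i p.2, acc ++ [(i : Int)]) := by
        simp [stepB, hqt]
      rw [hA, hB]
      apply ih _ _ _ n hw' _ (by simp at hlen ⊢; omega) hbd'
      rw [ht', htl, List.set_append, if_pos hiL]
      simp
    | none =>
      have hkn : L.length < n := by simp at hlen; omega
      have hrep : (List.replicate (n - L.length) NEG).findIdx?
          (fun x => decide (x < p.1 - pad)) = some 0 := by
        rw [List.findIdx?_replicate, if_pos ⟨by omega, by simpa using hbd1⟩]
      have hqt : stQuery t (p.1 - pad) = some L.length := by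
        rw [hquery, htl, List.findIdx?_append, hfl, hrep]
        simp [Option.or]
      have hA : stepA pad (L, acc) p = (L ++ [p.2], acc ++ [(L.length : Int)]) := by
        simp [stepA, hscan, hfl]
      have hB : stepB pad (t, acc) p = (stUpdate t L.length p.2, acc ++ [(L.length : Int)]) := by
        simp [stepB, hqt]
      rw [hA, hB]
      have hit : L.length < t.toL.length := by omega
      obtain ⟨hw', ht'⟩ := stUpdate_spec p.2 t L.length hwf hit
      apply ih _ _ _ n hw' _ (by simp at hlen ⊢; omega) hbd'
      rw [ht', htl, List.set_append, if_neg (by omega)]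
      have hrepcons : List.replicate (n - L.length) NEG =
          NEG :: List.replicate (n - L.length - 1) NEG := by
        obtain ⟨k, hk⟩ : ∃ k, n - L.length = k + 1 := ⟨n - L.length - 1, by omega⟩
        simp [hk, List.replicate_succ]
      have hlen' : n - (L ++ [p.2]).length = n - L.length - 1 := by
        simp; omega
      rw [hrepcons, hlen']
      simp

-- ===== VERDICT (by name: the statement is the Claim_ definition above) =====
theorem pack_lanes_spec : Claim_equal_pack_lanes := by
  intro starts ends pad hdom
  unfold Spec_pack_lanes pack_lanes pack_lanes_alt
  simp only [Dom_pack_lanes, Bool.and_eq_true, List.all_eq_true, pvDomInt,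
    decide_eq_true_eq] at hdom
  obtain ⟨⟨hs, _⟩, hp⟩ := hdom
  by_cases h0 : min starts.length ends.length = 0
  · have hz : starts.zip ends = [] := by
      have := List.length_zip (l₁ := starts) (l₂ := ends)
      rw [h0] at this
      exact List.eq_nil_of_length_eq_zero this
    simp [hz, h0]
  · have h1 : 1 ≤ min starts.length ends.length := by omega
    obtain ⟨hwf, htl, _⟩ := stBuild_spec _ h1
    simp only [if_neg h0]
    apply main_fold pad (starts.zip ends) [] _ [] (min starts.length ends.length) hwf
    · simpa using htl
    · simp [List.length_zip]
    · intro p hp'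
      have hmem := (List.of_mem_zip hp').1
      have := hs p.1 hmem
      simp [NEG]
      omega
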